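-- pv_equiv track=rewrite | github.com/cirro-admin/scholar | writing_workflow/outline_gen.py | _assign_voices_to_sections
-- ===== SOURCE A (Python) =====
-- def _assign_voices_to_sections(
--     sections: list[str],
--     voices: list[str],
--     clusters: dict[str, list[str]],
-- ) -> dict[str, list[str]]:
--     """Distribute human voices across sections roughly by relevance."""
--     assignment: dict[str, list[str]] = {s: [] for s in sections}
--     if not voices:
--         return assignment
--
--     # Simple round-robin with preference for intro/body sections
--     body_sections = [s for s in sections if s not in
--                      ("title_page", "table_of_contents", "references",
--                       "appendices", "acknowledgements", "changelog")]
--     for i, voice in enumerate(voices):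
--         target = body_sections[i % len(body_sections)] if body_sections else sections[0]
--         assignment[target].append(voice)
--     return assignment
-- ===== SOURCE B (Python) =====
-- def _assign_voices_to_sections(
--     sections: list[str],
--     voices: list[str],
--     clusters: dict[str, list[str]],
-- ) -> dict[str, list[str]]:
--     """Distribute human voices across sections roughly by relevance."""
--     assignment: dict[str, list[str]] = {s: [] for s in sections}
--     if not voices:
--         return assignment
--
--     body_sections = [s for s in sections if s not in
--                      ("title_page", "table_of_contents", "references",
--                       "appendices", "acknowledgements", "changelog")]
--     if body_sections:
--         n = len(body_sections)
--         for k, sec in enumerate(body_sections):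
--             assignment[sec].extend(
--                 [v for i, v in enumerate(voices) if i % n == k])
--     else:
--         assignment[sections[0]].extend(voices)
--     return assignment
-- ===== Notes on version B (the rewrite author's own statement) =====
-- stated objective: alternative
-- what changed: The driving loop is reversed: instead of iterating over voices and appending each to its round-robin target, B iterates over the body sections and extends each section's list with exactly the voices whose index is congruent to that section's position mod len(body_sections) (with the same sections[0] fallback when there are no body sections).
import Mathlib
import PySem

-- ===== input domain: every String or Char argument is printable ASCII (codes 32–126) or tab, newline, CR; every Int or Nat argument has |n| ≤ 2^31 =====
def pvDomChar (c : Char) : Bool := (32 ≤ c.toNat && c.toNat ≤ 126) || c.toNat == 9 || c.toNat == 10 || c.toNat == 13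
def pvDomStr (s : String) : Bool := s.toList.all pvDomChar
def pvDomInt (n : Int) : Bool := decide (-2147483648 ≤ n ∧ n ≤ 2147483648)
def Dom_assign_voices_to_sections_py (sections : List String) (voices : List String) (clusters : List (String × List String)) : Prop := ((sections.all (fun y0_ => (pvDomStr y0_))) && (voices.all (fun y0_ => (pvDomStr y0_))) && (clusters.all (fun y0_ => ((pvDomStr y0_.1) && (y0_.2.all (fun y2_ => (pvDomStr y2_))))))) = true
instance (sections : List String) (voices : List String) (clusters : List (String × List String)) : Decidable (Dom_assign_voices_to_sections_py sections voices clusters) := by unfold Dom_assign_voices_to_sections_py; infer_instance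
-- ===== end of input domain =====

-- B reverses the driving loop: it iterates over the body sections and gives each one the voices whose
-- index is congruent to that section's position (same sections[0] fallback); equal output on Pre_.

-- ===== PORT A =====
def pvBlacklist : List String :=
  ["title_page", "table_of_contents", "references", "appendices", "acknowledgements", "changelog"]

def assign_voices_to_sections_py (sections : List String) (voices : List String)
    (clusters : List (String × List String)) : List (String × List String) :=
  let assignment : PySem.Dict String (List String) :=
    sections.foldl (fun d s => d.insert s ([] : List String)) PySem.Dict.empty
  if voices = [] then assignment.items
  else
    let body := sections.filter (fun s => !(pvBlacklist.contains s))
    ((PySem.List.enumerate voices 0).foldl (fun d p =>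
        let target : String :=
          if body ≠ [] then PySem.List.pyGetD body (PySem.Int.mod p.1 ((body.length : ℤ))) ""
          else PySem.List.pyGetD sections 0 ""
        d.modify target [] (fun xs => xs ++ [p.2])) assignment).items

-- ===== PORT B =====
-- the voices whose index is ≡ k (mod n): B's inner comprehension
def pvBucket (voices : List String) (n : Int) (k : Int) : List String :=
  ((PySem.List.enumerate voices 0).filter (fun p => PySem.Int.mod p.1 n == k)).map (·.2)

def assign_voices_to_sections_py_alt (sections : List String) (voices : List String)
    (clusters : List (String × List String)) : List (String × List String) :=
  let assignment : PySem.Dict String (List String) :=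
    sections.foldl (fun d s => d.insert s ([] : List String)) PySem.Dict.empty
  if voices = [] then assignment.items
  else
    let body := sections.filter (fun s => !(pvBlacklist.contains s))
    if body = [] then
      (assignment.modify (PySem.List.pyGetD sections 0 "") [] (fun xs => xs ++ voices)).items
    else
      ((PySem.List.enumerate body 0).foldl (fun d q =>
          d.modify q.2 [] (fun xs => xs ++ pvBucket voices ((body.length : ℤ)) q.1)) assignment).items

-- ===== PRECONDITION & SPEC =====
-- Pre_ excludes (a) inputs where A raises IndexError (sections empty while voices is non-empty, so the
-- fallback indexes sections[0]); (b) inputs whose body-section list contains a duplicate string, on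
-- which the dict keys collapse and A's interleaving order inside the repeated key is accidental.
def Pre_assign_voices_to_sections_py (sections : List String) (voices : List String)
    (clusters : List (String × List String)) : Prop :=
  (sections.filter (fun s => !(pvBlacklist.contains s))).Nodup ∧ (voices = [] ∨ sections ≠ [])
instance (sections : List String) (voices : List String) (clusters : List (String × List String)) :
    Decidable (Pre_assign_voices_to_sections_py sections voices clusters) := by
  unfold Pre_assign_voices_to_sections_py; infer_instance

def pvWitness_assign_voices_to_sections_py : List String × List String × (List (String × List String)) :=
  (["intro", "references", "methods"], ["v1", "v2", "v3"], [("c", ["x"])])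

def Spec_assign_voices_to_sections_py (sections : List String) (voices : List String)
    (clusters : List (String × List String)) (out : List (String × List String)) : Prop :=
  out = assign_voices_to_sections_py_alt sections voices clusters
instance (sections : List String) (voices : List String) (clusters : List (String × List String))
    (out : List (String × List String)) : Decidable (Spec_assign_voices_to_sections_py sections voices clusters out) := by
  unfold Spec_assign_voices_to_sections_py; infer_instance

-- ===== CLAIM (what is proved, stated in full; the proofs are below) =====
def Claim_equal_assign_voices_to_sections_py : Prop := ∀ (sections : List String) (voices : List String) (clusters : List (String × List String)), Dom_assign_voices_to_sections_py sections voices clusters → Pre_assign_voices_to_sections_py sections voices clusters → Spec_assign_voices_to_sections_py sections voices clusters (assign_voices_to_sections_py sections voices clusters)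

-- ===== LEMMAS AND PROOFS =====

-- the init dict {s: [] for s in sections} only ever looks up to []
lemma pv_getD_init (l : List String) (d : PySem.Dict String (List String)) (c : String)
    (h : d.getD c [] = []) :
    (l.foldl (fun d s => d.insert s ([] : List String)) d).getD c [] = [] := by
  induction l generalizing d with
  | nil => simpa using h
  | cons s t ih =>
    simp only [List.foldl_cons]
    apply ih
    rw [PySem.Dict.getD_insert]
    split
    · rfl
    · exact h

-- a fold of "d[key x].extend(val x)" steps: the final lookup at c is the old value
-- followed by the extensions whose key is c, in loop order
lemma pv_getD_foldl_modify_extend {α : Type} (l : List α) (key : α → String) (val : α → List String)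
    (d : PySem.Dict String (List String)) (c : String) :
    (l.foldl (fun d x => d.modify (key x) [] (fun xs => xs ++ val x)) d).getD c []
      = d.getD c [] ++ (l.filter (fun x => key x == c)).flatMap val := by
  induction l generalizing d with
  | nil => simp
  | cons x t ih =>
    simp only [List.foldl_cons, List.filter_cons]
    rw [ih, PySem.Dict.getD_modify]
    by_cases hx : key x = c
    · simp [hx, List.append_assoc]
    · rw [if_neg (fun e => hx e.symm)]
      simp [beq_eq_false_iff_ne.mpr hx]

-- updating a set with members only leaves it unchanged
lemma pv_set_update_of_subset (s : PySem.Set String) (xs : List String)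
    (h : ∀ x ∈ xs, x ∈ s) : PySem.Set.update s xs = s := by
  rw [PySem.Set.update_eq_append_filter]
  have hf : List.filter (fun y => !s.contains y) (PySem.Set.ofList xs) = [] := by
    rw [List.filter_eq_nil_iff]
    intro y hy
    have hm : y ∈ s := h y ((PySem.Set.mem_ofList xs y).mp hy)
    simpa using hm
  rw [hf, List.append_nil]

lemma pv_filter_enumerate_not_mem (c : String) : ∀ (ys : List String), c ∉ ys → ∀ (s : Int),
    (PySem.List.enumerate ys s).filter (fun q => q.2 == c) = [] := by
  intro ys
  induction ys with
  | nil => intro _ s; simp [PySem.List.enumerate_nil]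
  | cons y t ih =>
    intro h s
    have hy : (y == c) = false := by
      rw [beq_eq_false_iff_ne]
      intro e; subst e; exact h (by simp)
    have h' : c ∉ t := fun hc => h (List.mem_cons_of_mem _ hc)
    simp only [PySem.List.enumerate_cons, List.filter_cons]
    simp [hy, ih h' (s + 1)]

-- in a Nodup list, filtering enumerate for the value at position k0 yields exactly that pair
lemma pv_filter_enumerate_nodup (c : String) : ∀ (ys : List String), ys.Nodup →
    ∀ (s : Int) (k0 : Nat) (hk : k0 < ys.length), ys[k0] = c →
    (PySem.List.enumerate ys s).filter (fun q => q.2 == c) = [(s + (k0 : Int), c)] := by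
  intro ys
  induction ys with
  | nil => intro _ s k0 hk; simp at hk
  | cons y t ih =>
    intro hnd s k0 hk hc
    obtain ⟨hy, hnd'⟩ := List.nodup_cons.mp hnd
    simp only [PySem.List.enumerate_cons, List.filter_cons]
    cases k0 with
    | zero =>
      have hyc : y = c := by simpa using hc
      have hnot : c ∉ t := hyc ▸ hy
      simp [hyc, pv_filter_enumerate_not_mem c t hnot (s + 1)]
    | succ j =>
      have hjc : t[j]'(by simpa using hk) = c := by simpa using hc
      have hj : j < t.length := by simpa using hk
      have hyne : (y == c) = false := by
        rw [beq_eq_false_iff_ne]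
        intro e
        exact hy (e ▸ hjc ▸ List.getElem_mem hj)
      have harith : s + 1 + (j : Int) = s + ((j + 1 : Nat) : Int) := by push_cast; ring
      simp only [hyne, Bool.false_eq_true, if_false]
      rw [ih hnd' (s + 1) j hj hjc, harith]

-- the inner flatMap of singletons is a projection
lemma pv_flatMap_snd (l : List (Int × String)) : l.flatMap (fun p => [p.2]) = l.map (·.2) := by
  induction l with
  | nil => rfl
  | cons x t ih => simp [ih]

-- ===== VERDICT (by name: the statement is the Claim_ definition above) =====
theorem assign_voices_to_sections_py_spec : Claim_equal_assign_voices_to_sections_py := by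
  intro sections voices clusters _hdom hpre
  obtain ⟨hnd, hvs⟩ := hpre
  unfold Spec_assign_voices_to_sections_py
  by_cases hv : voices = []
  · simp [assign_voices_to_sections_py, assign_voices_to_sections_py_alt, hv]
  · have hsec : sections ≠ [] := hvs.resolve_left hv
    simp only [assign_voices_to_sections_py, assign_voices_to_sections_py_alt, if_neg hv]
    set body := sections.filter (fun s => !(pvBlacklist.contains s)) with hbodydef
    set dinit := sections.foldl (fun d s => d.insert s ([] : List String)) PySem.Dict.empty with hinitdef
    have hget0 : ∀ c, dinit.getD c [] = [] := by
      intro c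
      rw [hinitdef]
      exact pv_getD_init sections PySem.Dict.empty c (PySem.Dict.getD_empty c [])
    have hkeys : dinit.keys = PySem.Set.ofList sections := by
      rw [hinitdef]
      have h1 := PySem.Dict.keys_foldl_insert sections (fun _ _ => ([] : List String)) PySem.Dict.empty
      simpa [PySem.Dict.keys_empty, PySem.Set.update_nil_left] using h1
    have hknd : dinit.keys.Nodup := by rw [hkeys]; exact PySem.Set.nodup_ofList sections
    by_cases hb : body = []
    · rw [if_pos hb]
      have hA : (PySem.List.enumerate voices 0).foldl
            (fun d p => d.modify (if body ≠ [] then PySem.List.pyGetD body (PySem.Int.mod p.1 ((body.length : ℤ))) ""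
              else PySem.List.pyGetD sections 0 "") [] (fun xs => xs ++ [p.2])) dinit
          = (PySem.List.enumerate voices 0).foldl
            (fun d p => d.modify (PySem.List.pyGetD sections 0 "") [] (fun xs => xs ++ [p.2])) dinit :=
        PySem.List.foldl_congr_mem _ _ _ _ (by intro acc x _; simp [hb])
      rw [hA]
      have hlen : 0 < sections.length := by
        cases sections with
        | nil => exact absurd rfl hsec
        | cons a l => simp
      have hs0mem : PySem.List.pyGetD sections 0 "" ∈ sections := by
        apply PySem.List.pyGetD_mem
        simp only [PySem.Raise.InRange]
        omega
      have hs0k : PySem.List.pyGetD sections 0 "" ∈ dinit.keys := by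
        rw [hkeys]
        exact (PySem.Set.mem_ofList _ _).mpr hs0mem
      have hkA := PySem.Dict.keys_foldl_modify_key (PySem.List.enumerate voices 0)
        (fun _ => PySem.List.pyGetD sections 0 "") ([] : List String)
        (fun _ p => fun xs => xs ++ [p.2]) dinit
      have hkAs : ((PySem.List.enumerate voices 0).foldl
            (fun d p => d.modify (PySem.List.pyGetD sections 0 "") [] (fun xs => xs ++ [p.2])) dinit).keys
          = dinit.keys := by
        rw [hkA]
        apply pv_set_update_of_subset
        intro x hx
        obtain ⟨p, _, rfl⟩ := List.mem_map.mp hx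
        exact hs0k
      have hndA : ((PySem.List.enumerate voices 0).foldl
            (fun d p => d.modify (PySem.List.pyGetD sections 0 "") [] (fun xs => xs ++ [p.2])) dinit).keys.Nodup := by
        rw [hkAs]; exact hknd
      have hcB : dinit.contains (PySem.List.pyGetD sections 0 "") = true :=
        (PySem.Dict.contains_iff_mem_keys dinit _).mpr hs0k
      have hkBs : (dinit.modify (PySem.List.pyGetD sections 0 "") [] (fun xs => xs ++ voices)).keys
          = dinit.keys := by
        rw [PySem.Dict.keys_modify]
        exact PySem.Dict.keys_insert_of_contains dinit _ hcB
      have hndB : (dinit.modify (PySem.List.pyGetD sections 0 "") [] (fun xs => xs ++ voices)).keys.Nodup := by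
        rw [hkBs]; exact hknd
      rw [PySem.Dict.items_eq_map_keys _ hndA ([] : List String),
          PySem.Dict.items_eq_map_keys _ hndB ([] : List String), hkAs, hkBs]
      apply List.map_congr_left
      intro k hk
      rw [Prod.mk.injEq]
      refine ⟨rfl, ?_⟩
      rw [pv_getD_foldl_modify_extend (PySem.List.enumerate voices 0)
            (fun _ => PySem.List.pyGetD sections 0 "") (fun p => [p.2]) dinit k,
          PySem.Dict.getD_modify, hget0]
      by_cases hks0 : k = PySem.List.pyGetD sections 0 ""
      · rw [if_pos hks0, hget0]
        simp [hks0, pv_flatMap_snd, PySem.List.map_snd_enumerate]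
      · rw [if_neg hks0]
        simp [beq_eq_false_iff_ne.mpr (fun e => hks0 e.symm)]
    · rw [if_neg hb]
      have hlenb : 0 < body.length := by
        cases hbl : body with
        | nil => exact absurd hbl hb
        | cons a l => simp
      have hbZ : (0 : ℤ) < (body.length : ℤ) := by exact_mod_cast hlenb
      have hA : (PySem.List.enumerate voices 0).foldl
            (fun d p => d.modify (if body ≠ [] then PySem.List.pyGetD body (PySem.Int.mod p.1 ((body.length : ℤ))) ""
              else PySem.List.pyGetD sections 0 "") [] (fun xs => xs ++ [p.2])) dinit
          = (PySem.List.enumerate voices 0).foldl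
            (fun d p => d.modify (PySem.List.pyGetD body (PySem.Int.mod p.1 ((body.length : ℤ))) "") []
              (fun xs => xs ++ [p.2])) dinit :=
        PySem.List.foldl_congr_mem _ _ _ _ (by intro acc x _; rw [if_pos hb])
      rw [hA]
      have hmem : ∀ p : ℤ × String,
          PySem.List.pyGetD body (PySem.Int.mod p.1 ((body.length : ℤ))) "" ∈ body := by
        intro p
        apply PySem.List.pyGetD_mem
        have h1 := PySem.Int.mod_nonneg p.1 hbZ
        have h2 := PySem.Int.mod_lt p.1 hbZ
        simp only [PySem.Raise.InRange]
        omega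
      have hmemk : ∀ x, x ∈ body → x ∈ dinit.keys := by
        intro x hx
        rw [hbodydef] at hx
        rw [hkeys]
        exact (PySem.Set.mem_ofList _ _).mpr (List.mem_of_mem_filter hx)
      have hkAs : ((PySem.List.enumerate voices 0).foldl
            (fun d p => d.modify (PySem.List.pyGetD body (PySem.Int.mod p.1 ((body.length : ℤ))) "") []
              (fun xs => xs ++ [p.2])) dinit).keys = dinit.keys := by
        rw [PySem.Dict.keys_foldl_modify_key (PySem.List.enumerate voices 0)
          (fun p => PySem.List.pyGetD body (PySem.Int.mod p.1 ((body.length : ℤ))) "") ([] : List String)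
          (fun _ p => fun xs => xs ++ [p.2]) dinit]
        apply pv_set_update_of_subset
        intro x hx
        obtain ⟨p, _, rfl⟩ := List.mem_map.mp hx
        exact hmemk _ (hmem p)
      have hndA : ((PySem.List.enumerate voices 0).foldl
            (fun d p => d.modify (PySem.List.pyGetD body (PySem.Int.mod p.1 ((body.length : ℤ))) "") []
              (fun xs => xs ++ [p.2])) dinit).keys.Nodup := by
        rw [hkAs]; exact hknd
      have hkBs : ((PySem.List.enumerate body 0).foldl
            (fun d q => d.modify q.2 [] (fun xs => xs ++ pvBucket voices ((body.length : ℤ)) q.1)) dinit).keys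
          = dinit.keys := by
        rw [PySem.Dict.keys_foldl_modify_key (PySem.List.enumerate body 0)
          (fun q => q.2) ([] : List String)
          (fun _ q => fun xs => xs ++ pvBucket voices ((body.length : ℤ)) q.1) dinit]
        apply pv_set_update_of_subset
        intro x hx
        rw [PySem.List.map_snd_enumerate] at hx
        exact hmemk _ hx
      have hndB : ((PySem.List.enumerate body 0).foldl
            (fun d q => d.modify q.2 [] (fun xs => xs ++ pvBucket voices ((body.length : ℤ)) q.1)) dinit).keys.Nodup := by
        rw [hkBs]; exact hknd
      rw [PySem.Dict.items_eq_map_keys _ hndA ([] : List String),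
          PySem.Dict.items_eq_map_keys _ hndB ([] : List String), hkAs, hkBs]
      apply List.map_congr_left
      intro k hk
      rw [Prod.mk.injEq]
      refine ⟨rfl, ?_⟩
      rw [pv_getD_foldl_modify_extend (PySem.List.enumerate voices 0)
            (fun p => PySem.List.pyGetD body (PySem.Int.mod p.1 ((body.length : ℤ))) "") (fun p => [p.2]) dinit k,
          pv_getD_foldl_modify_extend (PySem.List.enumerate body 0)
            (fun q => q.2) (fun q => pvBucket voices ((body.length : ℤ)) q.1) dinit k,
          hget0]
      by_cases hkb : k ∈ body
      · obtain ⟨k0, hk0, hck⟩ := List.mem_iff_getElem.mp hkb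
        rw [pv_filter_enumerate_nodup k body hnd 0 k0 hk0 hck]
        have hfilt : ∀ p ∈ PySem.List.enumerate voices 0,
            ((PySem.List.pyGetD body (PySem.Int.mod p.1 ((body.length : ℤ))) "" == k))
              = (PySem.Int.mod p.1 ((body.length : ℤ)) == ((0 : ℤ) + (k0 : ℤ))) := by
          intro p _
          have h1 := PySem.Int.mod_nonneg p.1 hbZ
          have h2 := PySem.Int.mod_lt p.1 hbZ
          have hgl : PySem.List.pyGetD body (PySem.Int.mod p.1 ((body.length : ℤ))) ""
              = body[(PySem.Int.mod p.1 ((body.length : ℤ))).toNat]'(by omega) :=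
            PySem.List.pyGetD_eq_getElem body "" h1 h2
          rw [hgl]
          by_cases hm : (PySem.Int.mod p.1 ((body.length : ℤ))).toNat = k0
          · have hmod : PySem.Int.mod p.1 ((body.length : ℤ)) = (0 : ℤ) + (k0 : ℤ) := by omega
            simp [hck, hmod]
          · have hne : body[(PySem.Int.mod p.1 ((body.length : ℤ))).toNat]'(by omega) ≠ k := by
              intro e
              exact hm (hnd.getElem_inj_iff.mp (e.trans hck.symm))
            have hmodne : PySem.Int.mod p.1 ((body.length : ℤ)) ≠ (0 : ℤ) + (k0 : ℤ) := by omega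
            rw [beq_eq_false_iff_ne.mpr hne, beq_eq_false_iff_ne.mpr hmodne]
        rw [List.filter_congr hfilt]
        simp [pvBucket, pv_flatMap_snd]
      · rw [pv_filter_enumerate_not_mem k body hkb 0]
        have hAf : (PySem.List.enumerate voices 0).filter
            (fun p => (PySem.List.pyGetD body (PySem.Int.mod p.1 ((body.length : ℤ))) "" == k)) = [] := by
          rw [List.filter_eq_nil_iff]
          intro p _
          simp only [beq_iff_eq]
          intro e
          exact hkb (e ▸ hmem p)
        rw [hAf]
        simp
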